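-- pv_equiv track=rewrite | github.com/PLSE-Lab/Python-MLAPI-expl | python_sources/some-more-hints.py | permchk
-- ===== SOURCE A (Python) =====
-- def permchk(s):
--     a = ""
--     for i in list(s):
--         if i>='a' and i<='z':
--             a+='x'
--         elif i>='A' and i<='Z':
--             a+='X'
--         else:
--             a+=i
--     return a
-- ===== SOURCE B (Python) =====
-- def permchk(s):
--     for c in "abcdefghijklmnopqrstuvwxyz":
--         s = s.replace(c, "x")
--     for c in "ABCDEFGHIJKLMNOPQRSTUVWXYZ":
--         s = s.replace(c, "X")
--     return s
-- ===== Notes on version B (the rewrite author's own statement) =====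
-- stated objective: faster
-- what changed: Replaced the single Python-level char-by-char scan with branch tests and string concatenation by 52 staged whole-string str.replace passes, one per alphabet letter, with no per-character Python branching.
import Mathlib
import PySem

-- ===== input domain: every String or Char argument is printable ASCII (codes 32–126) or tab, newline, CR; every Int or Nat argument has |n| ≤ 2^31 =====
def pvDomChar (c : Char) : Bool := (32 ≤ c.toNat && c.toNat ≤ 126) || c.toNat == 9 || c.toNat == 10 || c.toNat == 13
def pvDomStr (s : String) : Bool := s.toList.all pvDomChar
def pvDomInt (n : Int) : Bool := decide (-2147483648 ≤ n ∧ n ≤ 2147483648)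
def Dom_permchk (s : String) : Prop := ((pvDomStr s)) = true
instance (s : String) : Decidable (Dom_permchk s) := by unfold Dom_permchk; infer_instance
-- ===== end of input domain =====

-- B replaces the per-character branch scan by 52 staged whole-string replace passes (same asymptotics; a timing run measured B faster by a constant factor).

-- ===== PORT A =====
def permchk (s : String) : String :=
  s.toList.foldl (fun a i =>
    if 'a' ≤ i ∧ i ≤ 'z' then a ++ "x"
    else if 'A' ≤ i ∧ i ≤ 'Z' then a ++ "X"
    else a.push i) ""

-- ===== PORT B =====
-- for c in "abc…z": s = s.replace(c, "x"); then for c in "ABC…Z": s = s.replace(c, "X")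
def permchk_alt (s : String) : String :=
  let s1 := "abcdefghijklmnopqrstuvwxyz".toList.foldl
    (fun t c => PySem.Str.replace t (String.ofList [c]) "x") s
  "ABCDEFGHIJKLMNOPQRSTUVWXYZ".toList.foldl
    (fun t c => PySem.Str.replace t (String.ofList [c]) "X") s1

-- ===== PRECONDITION & SPEC =====
def Spec_permchk (s : String) (out : String) : Prop := out = permchk_alt s
instance (s : String) (out : String) : Decidable (Spec_permchk s out) := by unfold Spec_permchk; infer_instance

-- ===== CLAIM (what is proved, stated in full; the proofs are below) =====
def Claim_equal_permchk : Prop := ∀ (s : String), Dom_permchk s → Spec_permchk s (permchk s)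

-- ===== LEMMAS AND PROOFS =====

-- single-char substitution
def pvSub (a x c : Char) : Char := if c = a then x else c

theorem pv_go_single (a x : Char) (l : List Char) :
    ∀ (fuel : Nat) (acc : List Char), l.length ≤ fuel →
      PySem.Chars.replace.go [a] [x] fuel l acc = acc.reverse ++ l.map (pvSub a x) := by
  induction l with
  | nil =>
    intro fuel acc _
    cases fuel <;> simp [PySem.Chars.replace.go]
  | cons c t ih =>
    intro fuel acc h
    cases fuel with
    | zero => simp at h
    | succ n =>
      simp only [List.length_cons] at h
      by_cases hc : c = a
      · have : [a].isPrefixOf (c :: t) = true := by simp [List.isPrefixOf, hc]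
        simp [PySem.Chars.replace.go, this, ih n (x :: acc) (by omega), pvSub, hc]
      · have : [a].isPrefixOf (c :: t) = false := by
          simp only [List.isPrefixOf, Bool.and_eq_false_iff, beq_eq_false_iff_ne, ne_eq]
          exact Or.inl (fun h' => hc h'.symm)
        simp [PySem.Chars.replace.go, this, ih n (c :: acc) (by omega), pvSub, hc]

theorem pv_replace_single (a x : Char) (l : List Char) :
    PySem.Chars.replace l [a] [x] = l.map (pvSub a x) := by
  simp [PySem.Chars.replace, pv_go_single a x l l.length [] le_rfl]

-- one replace pass over the whole fold of letters, seen on .toList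
theorem pv_pass (letters : List Char) (x : Char) (xs : String) (hxs : xs.toList = [x]) :
    ∀ (t : String),
      (letters.foldl (fun t c => PySem.Str.replace t (String.ofList [c]) xs) t).toList
        = t.toList.map (fun ch => letters.foldl (fun d c => pvSub c x d) ch) := by
  induction letters with
  | nil => intro t; simp
  | cons c cs ih =>
    intro t
    rw [List.foldl_cons, ih]
    have hrep : (PySem.Str.replace t (String.ofList [c]) xs).toList
        = t.toList.map (pvSub c x) := by
      rw [PySem.Str.toList_replace]
      have h1 : (String.ofList [c]).toList = [c] := by simp
      rw [h1, hxs, pv_replace_single]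
    rw [hrep, List.map_map]
    simp [Function.comp, List.foldl_cons]

-- per-character agreement on all ASCII codes < 128
set_option maxRecDepth 8000 in
theorem pv_char_agree (n : Nat) (h : n < 128) :
    (let i := Char.ofNat n;
     (if 'a' ≤ i ∧ i ≤ 'z' then 'x' else if 'A' ≤ i ∧ i ≤ 'Z' then 'X' else i)
       = "ABCDEFGHIJKLMNOPQRSTUVWXYZ".toList.foldl (fun d c => pvSub c 'X' d)
           ("abcdefghijklmnopqrstuvwxyz".toList.foldl (fun d c => pvSub c 'x' d) i)) := by
  interval_cases n <;> decide

theorem pv_char_agree' (i : Char) (h : i.toNat < 128) :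
    (if 'a' ≤ i ∧ i ≤ 'z' then 'x' else if 'A' ≤ i ∧ i ≤ 'Z' then 'X' else i)
      = "ABCDEFGHIJKLMNOPQRSTUVWXYZ".toList.foldl (fun d c => pvSub c 'X' d)
          ("abcdefghijklmnopqrstuvwxyz".toList.foldl (fun d c => pvSub c 'x' d) i) := by
  have h2 := pv_char_agree i.toNat h
  simp only [Char.ofNat_toNat] at h2
  exact h2

-- A's fold characterised as a map
theorem pv_fold (l : List Char) (a : String) :
    l.foldl (fun a i =>
      if 'a' ≤ i ∧ i ≤ 'z' then a ++ "x"
      else if 'A' ≤ i ∧ i ≤ 'Z' then a ++ "X"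
      else a.push i) a
    = a ++ String.ofList (l.map (fun i =>
        if 'a' ≤ i ∧ i ≤ 'z' then 'x' else if 'A' ≤ i ∧ i ≤ 'Z' then 'X' else i)) := by
  induction l generalizing a with
  | nil => rw [← String.toList_inj]; simp
  | cons c l ih =>
    have step : (if 'a' ≤ c ∧ c ≤ 'z' then a ++ "x"
        else if 'A' ≤ c ∧ c ≤ 'Z' then a ++ "X"
        else a.push c)
        = a.push (if 'a' ≤ c ∧ c ≤ 'z' then 'x' else if 'A' ≤ c ∧ c ≤ 'Z' then 'X' else c) := by
      split_ifs <;> rfl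
    rw [List.foldl_cons, step, ih]
    rw [← String.toList_inj]
    simp

-- ===== VERDICT (by name: the statement is the Claim_ definition above) =====
set_option maxRecDepth 8000 in
theorem permchk_spec : Claim_equal_permchk := by
  intro s hs
  have hlt : ∀ c ∈ s.toList, c.toNat < 128 := by
    intro c hc
    have := List.all_eq_true.mp hs c hc
    simp [pvDomChar] at this
    omega
  unfold Spec_permchk permchk permchk_alt
  rw [pv_fold s.toList ""]
  show ("" ++ String.ofList (List.map (fun i =>
        if 'a' ≤ i ∧ i ≤ 'z' then 'x' else if 'A' ≤ i ∧ i ≤ 'Z' then 'X' else i) s.toList))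
    = "ABCDEFGHIJKLMNOPQRSTUVWXYZ".toList.foldl
        (fun t c => PySem.Str.replace t (String.ofList [c]) "X")
        ("abcdefghijklmnopqrstuvwxyz".toList.foldl
          (fun t c => PySem.Str.replace t (String.ofList [c]) "x") s)
  rw [← String.toList_inj]
  rw [pv_pass "ABCDEFGHIJKLMNOPQRSTUVWXYZ".toList 'X' "X" (by decide),
      pv_pass "abcdefghijklmnopqrstuvwxyz".toList 'x' "x" (by decide),
      List.map_map]
  have hL : ("" ++ String.ofList (List.map (fun i =>
        if 'a' ≤ i ∧ i ≤ 'z' then 'x' else if 'A' ≤ i ∧ i ≤ 'Z' then 'X' else i) s.toList)).toList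
      = List.map (fun i =>
        if 'a' ≤ i ∧ i ≤ 'z' then 'x' else if 'A' ≤ i ∧ i ≤ 'Z' then 'X' else i) s.toList := by
    simp
  rw [hL]
  apply List.map_congr_left
  intro i hi
  simp only [Function.comp_apply]
  exact pv_char_agree' i (hlt i hi)
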